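-- pv_equiv track=rewrite | github.com/brownbeardeveloper/leet-code | available_captures_rook.py | captures_in_list
-- ===== SOURCE A (Python) =====
-- def captures_in_list(rook_list: list) -> int:
--     find_p = False
--     pass_r = False
--     scores = 0
--
--     for char in rook_list:
--         if char == "p" and pass_r == False and find_p == False:
--             find_p = True
--         elif char == "B" and pass_r == True:
--             break
--         elif char == "B":  # and pass_r == False
--             find_p = False
--         elif char == "R" and find_p == True:
--             scores += 1
--             find_p = False
--             pass_r = True
--         elif char == "R":  # and find_p == False
--             pass_r = True
--         elif char == "p" and pass_r == True:
--             scores += 1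
--             break
--
--     return scores
-- ===== SOURCE B (Python) =====
-- def _dir_score(cells):
--     for c in cells:
--         if c == "p":
--             return 1
--         if c == "B":
--             return 0
--     return 0
--
--
-- def captures_in_list(rook_list: list) -> int:
--     try:
--         i = rook_list.index("R")
--     except ValueError:
--         return 0
--     return _dir_score(reversed(rook_list[:i])) + _dir_score(rook_list[i + 1:])
-- ===== Notes on version B (the rewrite author's own statement) =====
-- stated objective: alternative
-- what changed: Replaces A's single forward pass with two boolean flags by locating the first 'R' with list.index and scanning outward in each direction, stopping at the first 'p'/'B'.
import Mathlib
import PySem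

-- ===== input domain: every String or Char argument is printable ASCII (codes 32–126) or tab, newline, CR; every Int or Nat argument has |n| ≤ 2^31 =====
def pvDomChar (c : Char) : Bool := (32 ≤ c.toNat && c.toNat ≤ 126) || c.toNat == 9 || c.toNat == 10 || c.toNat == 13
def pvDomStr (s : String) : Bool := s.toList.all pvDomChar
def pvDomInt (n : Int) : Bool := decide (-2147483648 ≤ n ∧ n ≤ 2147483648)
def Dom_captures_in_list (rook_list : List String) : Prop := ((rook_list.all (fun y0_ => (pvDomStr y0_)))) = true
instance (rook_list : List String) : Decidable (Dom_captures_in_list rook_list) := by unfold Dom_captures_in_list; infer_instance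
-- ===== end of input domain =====

-- B replaces A's one-pass two-flag machine by index('R') plus two outward directional scans (alternative decomposition, same cost).

-- ===== PORT A =====
-- literal transliteration of A's flag-machine loop (break = return of current scores)
def capturesLoop : List String → Bool → Bool → Int → Int
  | [], _, _, scores => scores
  | c :: rest, find_p, pass_r, scores =>
    if c = "p" ∧ pass_r = false ∧ find_p = false then
      capturesLoop rest true pass_r scores
    else if c = "B" ∧ pass_r = true then
      scores
    else if c = "B" then
      capturesLoop rest false pass_r scores
    else if c = "R" ∧ find_p = true then
      capturesLoop rest false true (scores + 1)
    else if c = "R" then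
      capturesLoop rest find_p true scores
    else if c = "p" ∧ pass_r = true then
      scores + 1
    else
      capturesLoop rest find_p pass_r scores

def captures_in_list (rook_list : List String) : Int :=
  capturesLoop rook_list false false 0

-- ===== PORT B =====
-- _dir_score: first 'p' scores 1, first 'B' stops with 0, anything else skipped
def dirScore : List String → Int
  | [] => 0
  | c :: rest => if c = "p" then 1 else if c = "B" then 0 else dirScore rest

def captures_in_list_alt (rook_list : List String) : Int :=
  match PySem.List.index? rook_list "R" with
  | none => 0
  | some i => dirScore (rook_list.take i).reverse + dirScore (rook_list.drop (i + 1))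

-- ===== PRECONDITION & SPEC =====
def Spec_captures_in_list (rook_list : List String) (out : Int) : Prop := out = captures_in_list_alt rook_list
instance (rook_list : List String) (out : Int) : Decidable (Spec_captures_in_list rook_list out) := by unfold Spec_captures_in_list; infer_instance

-- ===== CLAIM (what is proved, stated in full; the proofs are below) =====
def Claim_equal_captures_in_list : Prop := ∀ (rook_list : List String), Dom_captures_in_list rook_list → Spec_captures_in_list rook_list (captures_in_list rook_list)

-- ===== LEMMAS AND PROOFS =====

-- A never scores if the list contains no 'R'
theorem capturesLoop_no_R (l : List String) (f : Bool) (s : Int) (h : "R" ∉ l) :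
    capturesLoop l f false s = s := by
  induction l generalizing f with
  | nil => rfl
  | cons c rest ih =>
    have hc : c ≠ "R" := fun hcR => h (hcR ▸ List.mem_cons_self)
    have hr : "R" ∉ rest := fun hm => h (List.mem_cons_of_mem _ hm)
    simp only [capturesLoop]
    split_ifs <;> first | exact ih _ hr | simp_all

-- the pre-R step function of A's loop
def stepPre (f : Bool) (c : String) : Bool :=
  if c = "p" then true else if c = "B" then false else f

-- left phase: before any 'R', A's loop folds stepPre over the prefix
theorem capturesLoop_prefix (pre post : List String) (f : Bool) (s : Int) (h : "R" ∉ pre) :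
    capturesLoop (pre ++ post) f false s = capturesLoop post (pre.foldl stepPre f) false s := by
  induction pre generalizing f with
  | nil => rfl
  | cons c rest ih =>
    have hc : c ≠ "R" := fun hcR => h (hcR ▸ List.mem_cons_self)
    have hr : "R" ∉ rest := fun hm => h (List.mem_cons_of_mem _ hm)
    simp only [List.cons_append, capturesLoop, List.foldl_cons, stepPre]
    split_ifs with h1 h2 h3 h4 h5 h6 <;>
      first
      | (exact absurd rfl (by simp_all))
      | (obtain ⟨hp, -, hf⟩ := h1; subst hp hf; simpa using ih _ hr)
      | (simp_all [ih _ hr])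

-- the fold over the prefix computes the reverse directional scan
theorem foldl_stepPre_eq_dirScore (pre : List String) :
    dirScore pre.reverse = if pre.foldl stepPre false then 1 else 0 := by
  induction pre using List.reverseRecOn with
  | nil => rfl
  | append_singleton rest c ih =>
    simp only [List.reverse_append, List.reverse_cons, List.reverse_nil, List.nil_append,
      List.cons_append, dirScore, List.foldl_append, List.foldl_cons, List.foldl_nil, stepPre]
    split_ifs <;> simp_all

-- right phase: after the rook, A's loop adds dirScore of the suffix
theorem capturesLoop_post (post : List String) (s : Int) :
    capturesLoop post false true s = s + dirScore post := by
  induction post generalizing s with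
  | nil => simp [capturesLoop, dirScore]
  | cons c rest ih =>
    simp only [capturesLoop, dirScore]
    split_ifs with h1 h2 h3 h4 h5 h6 <;> simp_all [ih]

-- ===== VERDICT (by name: the statement is the Claim_ definition above) =====
theorem captures_in_list_spec : Claim_equal_captures_in_list := by
  intro l _
  show captures_in_list l = captures_in_list_alt l
  unfold captures_in_list captures_in_list_alt
  cases hidx : PySem.List.index? l "R" with
  | none =>
    have hnm : "R" ∉ l := (PySem.List.index?_eq_none_iff _ _).1 hidx
    exact capturesLoop_no_R l false 0 hnm
  | some i =>
    obtain ⟨pre, suf, hl, hlen, hnm⟩ := (PySem.List.index?_eq_some_iff _ _ _).1 hidx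
    subst hl
    have htake : (pre ++ "R" :: suf).take i = pre := by
      subst hlen; simp
    have hdrop : (pre ++ "R" :: suf).drop (i + 1) = suf := by
      subst hlen; simp
    show capturesLoop (pre ++ "R" :: suf) false false 0 =
        dirScore ((pre ++ "R" :: suf).take i).reverse + dirScore ((pre ++ "R" :: suf).drop (i + 1))
    rw [htake, hdrop, capturesLoop_prefix pre ("R" :: suf) false 0 hnm]
    rw [foldl_stepPre_eq_dirScore]
    cases hf : pre.foldl stepPre false <;>
      simp [capturesLoop, hf, capturesLoop_post, add_comm]
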